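-- pv_equiv track=rewrite | github.com/anebz/ctci | Chapter 1 Arrays and strings/1.5. levenshtein.py | levenshtein
-- ===== SOURCE A (Python) =====
-- def levenshtein(s1, s2):
--     if abs(len(s1) - len(s2)) > 1:
--         return False
--     if s1 == s2:
--         return True
--
--     len1 = len(s1)
--     len2 = len(s2)
--     flag = False
--
--     if len1 == len2:  # equal lengths
--         for i in range(len1):
--             if s1[i] != s2[i]:
--                 if flag:
--                     return False
--                 flag = True
--         return True
--
--     elif len1 < len2:  # s1 shorter than s2
--         for i in range(len1):
--             if not flag:
--                 if s1[i] != s2[i]: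
--                     if flag:
--                         return False
--                     flag = True
--             else: # there's already one difference
--                 if s1[i] != s2[i + 1]:
--                     return False
--         return True
--
--     elif len2 < len1:  # s2 shorter than s1
--         for i in range(len2):
--             if not flag:
--                 if s1[i] != s2[i]:
--                     if flag:
--                         return False
--                     flag = True
--             else:  # there's already one difference
--                 if s1[i + 1] != s2[i]:
--                     return False
--         return True
-- ===== SOURCE B (Python) =====
-- def levenshtein(s1, s2):
--     # Full edit-distance DP over suffixes with a rolling row, then compare to 1.
--     # rrow[k] = edit distance between the current suffix of s1 and the suffix
--     # of s2 of length k.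
--     rrow = list(range(len(s2) + 1))
--     for c1 in reversed(s1):
--         new = [rrow[0] + 1]
--         for c2, d, u in zip(reversed(s2), rrow, rrow[1:]):
--             # d = dist(old suffix, shorter s2-suffix)  (diagonal)
--             # u = dist(old suffix, current s2-suffix)
--             new.append(min(u + 1, new[-1] + 1, d + (c1 != c2)))
--         rrow = new
--     return rrow[len(s2)] <= 1
-- ===== Notes on version B (the rewrite author's own statement) =====
-- stated objective: alternative
-- what changed: Replaces A's three flag-carrying positional scan loops (separate cases for equal, shorter and longer strings) by the classic Levenshtein dynamic program: a rolling DP row over suffixes computes the full edit distance, and B returns whether that distance is at most 1; this also fixes A's missed cross-comparison at the first mismatch in the off-by-one-length case.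
-- intended difference: On strings whose lengths differ by exactly one, A never compares shorter[i] with longer[i+1] at the first mismatch index i, so when the strings agree shifted-by-one only after i but that skipped pair differs (e.g. 'a' vs 'bc'), A returns True while B returns False, the correct edit-distance-at-most-1 answer. — e.g. on levenshtein("a", "bc"): A returns true, B returns false
import Mathlib
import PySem

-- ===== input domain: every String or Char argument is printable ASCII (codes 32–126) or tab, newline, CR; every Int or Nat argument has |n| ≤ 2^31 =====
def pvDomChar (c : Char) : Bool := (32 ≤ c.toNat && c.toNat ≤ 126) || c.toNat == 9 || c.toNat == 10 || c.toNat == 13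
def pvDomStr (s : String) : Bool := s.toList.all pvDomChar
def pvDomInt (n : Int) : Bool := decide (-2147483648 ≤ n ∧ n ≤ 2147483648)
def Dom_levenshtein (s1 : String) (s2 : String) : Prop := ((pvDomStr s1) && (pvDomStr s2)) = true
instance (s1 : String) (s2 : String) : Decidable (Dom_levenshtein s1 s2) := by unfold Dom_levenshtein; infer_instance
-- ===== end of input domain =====

-- B replaces A's three flag-carrying scan loops by the classic Levenshtein DP
-- (rolling row over suffixes) followed by a ≤ 1 test (objective: alternative),
-- and fixes A's missed cross-comparison at the first mismatch in the
-- unequal-length case (see D_ below).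

-- ===== PORT A =====
-- equal-length loop: for i in range(len1): if s1[i] != s2[i]: if flag: return False; flag = True
def levLoopE : List Char → List Char → Bool → Bool
  | [], _, _ => true
  | _ :: _, [], _ => true            -- unreachable: called only with equal lengths
  | x :: xs, y :: ys, flag =>
    if x ≠ y then (if flag then false else levLoopE xs ys true)
    else levLoopE xs ys flag
-- s1-shorter loop; second argument is s2[i:] while flag is unset and s2[i+1:] once it is set
def levLoopS : List Char → List Char → Bool → Bool
  | [], _, _ => true
  | _ :: _, [], _ => true            -- unreachable: s2 is strictly longer than s1 here
  | x :: xs, y :: ys, false => if x ≠ y then levLoopS xs (ys.drop 1) true else levLoopS xs ys false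
  | x :: xs, y :: ys, true  => if x ≠ y then false else levLoopS xs ys true
-- s2-shorter loop, the mirror image (first argument carries the s1 suffix)
def levLoopL : List Char → List Char → Bool → Bool
  | _, [], _ => true
  | [], _ :: _, _ => true            -- unreachable: s1 is strictly longer than s2 here
  | x :: xs, y :: ys, false => if x ≠ y then levLoopL (xs.drop 1) ys true else levLoopL xs ys false
  | x :: xs, y :: ys, true  => if x ≠ y then false else levLoopL xs ys true

def levenshtein (s1 : String) (s2 : String) : Bool :=
  let l1 := s1.toList
  let l2 := s2.toList
  if ((l1.length : Int) - (l2.length : Int)).natAbs > 1 then false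
  else if l1 = l2 then true
  else if l1.length = l2.length then levLoopE l1 l2 false
  else if l1.length < l2.length then levLoopS l1 l2 false
  else levLoopL l1 l2 false

-- ===== PORT B =====
-- inner loop: for c2, d, u in zip(reversed(s2), rrow, rrow[1:]):
--               new.append(min(u + 1, new[-1] + 1, d + (c1 != c2)))
def levStep (c1 : Char) (rb : List Char) (rrow : List Nat) : List Nat :=
  (rb.zip (rrow.zip rrow.tail)).foldl
    (fun new t =>
      new ++ [min (t.2.2 + 1) (min (new.getLastD 0 + 1) (t.2.1 + (if c1 ≠ t.1 then 1 else 0)))])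
    [rrow.headD 0 + 1]

-- rrow = list(range(len(s2)+1)); for c1 in reversed(s1): rrow = <inner loop>; return rrow[len(s2)] <= 1
def levenshtein_alt (s1 : String) (s2 : String) : Bool :=
  let a := s1.toList
  let b := s2.toList
  let final := a.reverse.foldl (fun rrow c1 => levStep c1 b.reverse rrow) (List.range (b.length + 1))
  decide (final.getD b.length 0 ≤ 1)

-- ===== PRECONDITION & SPEC =====
-- On strings whose lengths differ by one, once A sees the first mismatch at index i it
-- only checks shifted agreement from i+1 on and never compares shorter[i] with longer[i+1],
-- so A returns True on such inputs even when that skipped pair differs (e.g. "a" vs "bc"),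
-- while B returns False, the correct edit-distance-≤-1 answer.
def Dcore (a b : List Char) : Prop :=
  b.length = a.length + 1 ∧ ∃ i < a.length,
    a.take i = b.take i ∧ a[i]? ≠ b[i]? ∧ a ≠ b.eraseIdx i ∧ a.drop (i + 1) = b.drop (i + 2)

def D_levenshtein (s1 : String) (s2 : String) : Prop :=
  Dcore s1.toList s2.toList ∨ Dcore s2.toList s1.toList

instance (s1 : String) (s2 : String) : Decidable (D_levenshtein s1 s2) := by
  unfold D_levenshtein Dcore; infer_instance

def Spec_levenshtein (s1 : String) (s2 : String) (out : Bool) : Prop :=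
  ¬ D_levenshtein s1 s2 → out = levenshtein_alt s1 s2
instance (s1 : String) (s2 : String) (out : Bool) : Decidable (Spec_levenshtein s1 s2 out) := by
  unfold Spec_levenshtein; infer_instance

def pvDiffWitness_levenshtein : String × String := ("a", "bc")
def pvDiffWitnessOut_levenshtein : Bool × Bool := (true, false)

-- ===== CLAIM (what is proved, stated in full; the proofs are below) =====
def Claim_unchanged_levenshtein : Prop := ∀ (s1 : String) (s2 : String), Dom_levenshtein s1 s2 → Spec_levenshtein s1 s2 (levenshtein s1 s2)
def Claim_changed_levenshtein : Prop := Dom_levenshtein (pvDiffWitness_levenshtein.1) (pvDiffWitness_levenshtein.2) ∧ D_levenshtein (pvDiffWitness_levenshtein.1) (pvDiffWitness_levenshtein.2) ∧ levenshtein (pvDiffWitness_levenshtein.1) (pvDiffWitness_levenshtein.2) = pvDiffWitnessOut_levenshtein.1 ∧ levenshtein_alt (pvDiffWitness_levenshtein.1) (pvDiffWitness_levenshtein.2) = pvDiffWitnessOut_levenshtein.2 ∧ pvDiffWitnessOut_levenshtein.1 ≠ pvDiffWitnessOut_levenshtein.2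
def Claim_exact_levenshtein : Prop := ∀ (s1 : String) (s2 : String), Dom_levenshtein s1 s2 → D_levenshtein s1 s2 → levenshtein s1 s2 ≠ levenshtein_alt s1 s2

-- ===== LEMMAS AND PROOFS =====

-- reference edit distance (proof-side specification of what B's DP computes)
def edst : List Char → List Char → Nat
  | [], b => b.length
  | _ :: xs, [] => xs.length + 1
  | x :: xs, y :: ys =>
    if x = y then edst xs ys
    else 1 + min (edst xs (y :: ys)) (min (edst (x :: xs) ys) (edst xs ys))
termination_by a b => a.length + b.length

theorem edst_nil_right (a : List Char) : edst a [] = a.length := by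
  cases a <;> simp [edst]

theorem edst_comm (a b : List Char) : edst a b = edst b a := by
  induction a, b using edst.induct with
  | case1 b => rw [edst_nil_right]; cases b <;> simp [edst]
  | case2 x xs => simp [edst]
  | case3 xs y ys ih => simp [edst, ih]
  | case4 x xs y ys h ih1 ih2 ih3 =>
    rw [show edst (x :: xs) (y :: ys) = 1 + min (edst xs (y :: ys)) (min (edst (x :: xs) ys) (edst xs ys)) by simp [edst, h],
        show edst (y :: ys) (x :: xs) = 1 + min (edst ys (x :: xs)) (min (edst (y :: ys) xs) (edst ys xs)) by simp [edst, Ne.symm h]]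
    rw [ih1, ih2, ih3]
    omega

theorem edst_mono : ∀ (n : Nat) (a b : List Char), a.length + b.length = n →
    (∀ x, edst (x :: a) b ≤ edst a b + 1) ∧ (∀ y, edst a b ≤ edst a (y :: b) + 1) := by
  intro n
  induction n using Nat.strong_induction_on with
  | _ n IH =>
    intro a b hn
    constructor
    · intro x
      cases b with
      | nil => simp [edst_nil_right]
      | cons y ys =>
        by_cases hxy : x = y
        · subst hxy
          have h2 := (IH (a.length + ys.length) (by simp at hn; omega) a ys rfl).2 x
          simpa [edst] using h2
        · have : edst (x :: a) (y :: ys) = 1 + min (edst a (y :: ys)) (min (edst (x :: a) ys) (edst a ys)) := by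
            simp [edst, hxy]
          rw [this]; omega
    · intro y
      cases a with
      | nil => simp [edst]; omega
      | cons x xs =>
        by_cases hxy : x = y
        · subst hxy
          have h1 := (IH (xs.length + b.length) (by simp at hn; omega) xs b rfl).1 x
          simpa [edst] using h1
        · have h1 := (IH (xs.length + b.length) (by simp at hn; omega) xs b rfl).1 x
          have h2 := (IH (xs.length + b.length) (by simp at hn; omega) xs b rfl).2 y
          have : edst (x :: xs) (y :: b) = 1 + min (edst xs (y :: b)) (min (edst (x :: xs) b) (edst xs b)) := by
            simp [edst, hxy]
          rw [this]; omega

theorem edst_le_cons_right (y : Char) (a b : List Char) : edst a b ≤ edst a (y :: b) + 1 :=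
  (edst_mono (a.length + b.length) a b rfl).2 y
theorem edst_le_cons_left (x : Char) (a b : List Char) : edst a b ≤ edst (x :: a) b + 1 := by
  rw [edst_comm a b, edst_comm (x :: a) b]
  exact (edst_mono (b.length + a.length) b a rfl).2 x

-- the DP min-recurrence agrees with edst's branching recurrence
theorem edst_step (c z : Char) (a s : List Char) :
    edst (c :: a) (z :: s) =
      min (edst a (z :: s) + 1) (min (edst (c :: a) s + 1) (edst a s + (if c ≠ z then 1 else 0))) := by
  by_cases hcz : c = z
  · subst hcz
    have h1 := edst_le_cons_right c a s
    have h2 := edst_le_cons_left c a s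
    have e1 : edst (c :: a) (c :: s) = edst a s := by simp [edst]
    have e2 : (if c ≠ c then 1 else 0) = 0 := by simp
    rw [e1, e2]
    omega
  · have : edst (c :: a) (z :: s) = 1 + min (edst a (z :: s)) (min (edst (c :: a) s) (edst a s)) := by
      simp [edst, hcz]
    rw [this]
    simp only [if_pos hcz]
    omega

theorem edst_eq_zero (a b : List Char) : edst a b = 0 ↔ a = b := by
  induction a, b using edst.induct with
  | case1 b => cases b <;> simp [edst]
  | case2 x xs => simp [edst]
  | case3 xs y ys ih => simp [edst, ih]
  | case4 x xs y ys h ih1 ih2 ih3 => simp [edst, h]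

theorem edst_length (a b : List Char) :
    b.length ≤ a.length + edst a b ∧ a.length ≤ b.length + edst a b := by
  induction a, b using edst.induct with
  | case1 b => simp [edst]
  | case2 x xs => simp [edst]
  | case3 xs y ys ih =>
    rw [show edst (y :: xs) (y :: ys) = edst xs ys by simp [edst]]
    simp only [List.length_cons]
    omega
  | case4 x xs y ys h ih1 ih2 ih3 =>
    have : edst (x :: xs) (y :: ys) = 1 + min (edst xs (y :: ys)) (min (edst (x :: xs) ys) (edst xs ys)) := by
      simp [edst, h]
    rw [this]
    simp only [List.length_cons] at *
    omega

theorem countP_zip_zero (a b : List Char) (h : a.length = b.length) :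
    (a.zip b).countP (fun p => decide (p.1 ≠ p.2)) = 0 ↔ a = b := by
  induction a generalizing b with
  | nil => cases b with
    | nil => simp
    | cons z zs => simp at h
  | cons x xs ih => cases b with
    | nil => simp at h
    | cons z zs =>
      rw [List.zip_cons_cons, List.countP_cons]
      by_cases hxz : x = z
      · subst hxz; simpa using ih zs (by simpa using h)
      · simp [hxz]

-- equal lengths: distance ≤ 1 iff at most one positional mismatch
theorem edst_eq_len (a b : List Char) (h : a.length = b.length) :
    edst a b ≤ 1 ↔ (a.zip b).countP (fun p => decide (p.1 ≠ p.2)) ≤ 1 := by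
  induction a generalizing b with
  | nil => cases b with
    | nil => simp [edst]
    | cons z zs => simp at h
  | cons x xs ih => cases b with
    | nil => simp at h
    | cons z zs =>
      have hlen : xs.length = zs.length := by simpa using h
      by_cases hxz : x = z
      · subst hxz
        rw [List.zip_cons_cons, List.countP_cons]
        simpa [edst] using ih zs hlen
      · have he : edst (x :: xs) (z :: zs) = 1 + min (edst xs (z :: zs)) (min (edst (x :: xs) zs) (edst xs zs)) := by
          simp [edst, hxz]
        have hcnt : ((x :: xs).zip (z :: zs)).countP (fun p => decide (p.1 ≠ p.2))
            = (xs.zip zs).countP (fun p => decide (p.1 ≠ p.2)) + 1 := by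
          rw [List.zip_cons_cons, List.countP_cons]; simp [hxz]
        rw [he, hcnt]
        constructor
        · intro hle
          have h3 : edst xs zs = 0 := by
            by_cases h1 : edst xs (z :: zs) = 0
            · exfalso
              have := congrArg List.length ((edst_eq_zero _ _).mp h1)
              simp at this; omega
            · by_cases h2 : edst (x :: xs) zs = 0
              · exfalso
                have := congrArg List.length ((edst_eq_zero _ _).mp h2)
                simp at this; omega
              · omega
          have hxz' : xs = zs := (edst_eq_zero _ _).mp h3
          subst hxz'
          rw [(countP_zip_zero xs xs rfl).mpr rfl]
        · intro hle
          have h0 : (xs.zip zs).countP (fun p => decide (p.1 ≠ p.2)) = 0 := by omega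
          have hxz' : xs = zs := (countP_zip_zero xs zs hlen).mp h0
          subst hxz'
          have h00 : edst xs xs = 0 := (edst_eq_zero _ _).mpr rfl
          omega

-- old-style one-deletion scan, used only as a proof-side characterisation
def altScan : List Char → List Char → Bool
  | x :: xs, y :: ys => if x = y then altScan xs ys else decide (x :: xs = ys)
  | xs, ys => decide (xs = ys.drop 1)

-- length gap exactly one: distance ≤ 1 iff the scan-and-skip check succeeds
theorem edst_succ_len (a b : List Char) (h : b.length = a.length + 1) :
    edst a b ≤ 1 ↔ altScan a b = true := by
  induction a generalizing b with
  | nil => cases b with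
    | nil => simp at h
    | cons z zs =>
      have : zs = [] := by simpa using List.length_eq_zero_iff.mp (by simpa using h)
      subst this
      simp [edst, altScan]
  | cons x xs ih => cases b with
    | nil => simp at h
    | cons z zs =>
      have hlen : zs.length = xs.length + 1 := by simpa using h
      by_cases hxz : x = z
      · subst hxz
        simpa [edst, altScan] using ih zs hlen
      · have he : edst (x :: xs) (z :: zs) = 1 + min (edst xs (z :: zs)) (min (edst (x :: xs) zs) (edst xs zs)) := by
          simp [edst, hxz]
        rw [he]
        simp only [altScan, if_neg hxz]
        constructor
        · intro hle
          have h2 : edst (x :: xs) zs = 0 := by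
            by_cases h1 : edst xs (z :: zs) = 0
            · exfalso
              have := congrArg List.length ((edst_eq_zero _ _).mp h1)
              simp at this; omega
            · by_cases h3 : edst xs zs = 0
              · exfalso
                have := congrArg List.length ((edst_eq_zero _ _).mp h3)
                simp at this; omega
              · omega
          simpa using (edst_eq_zero _ _).mp h2
        · intro hs
          have : x :: xs = zs := by simpa using hs
          have : edst (x :: xs) zs = 0 := (edst_eq_zero _ _).mpr this
          omega

-- ---- the DP row computes edst on every suffix ----

def gLev (c1 : Char) (x : Nat) (t : Char × Nat × Nat) : Nat :=
  min (t.2.2 + 1) (min (x + 1) (t.2.1 + (if c1 ≠ t.1 then 1 else 0)))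

theorem foldl_append_scanl {β : Type} (f : Nat → β → Nat) :
    ∀ (l : List β) (acc : List Nat) (x : Nat),
      l.foldl (fun new t => new ++ [f (new.getLastD 0) t]) (acc ++ [x]) = acc ++ List.scanl f x l := by
  intro l
  induction l with
  | nil => intro acc x; simp [List.scanl_nil]
  | cons t ts ih =>
    intro acc x
    rw [List.foldl_cons]
    have hlast : (acc ++ [x]).getLastD 0 = x := by
      simp [List.getLastD_eq_getLast?]
    rw [hlast, ih (acc ++ [x]) (f x t), List.scanl_cons]
    simp

theorem levStep_eq_scanl (c1 : Char) (rb : List Char) (rrow : List Nat) :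
    levStep c1 rb rrow = List.scanl (gLev c1) (rrow.headD 0 + 1) (rb.zip (rrow.zip rrow.tail)) := by
  have := foldl_append_scanl (gLev c1) (rb.zip (rrow.zip rrow.tail)) [] (rrow.headD 0 + 1)
  simpa [levStep, gLev] using this

-- rowF a' s rb : the DP row for first-string suffix a', where entry k is
-- edst a' (suffix of length k obtained by consing the first k chars of rb onto s)
def rowF (a' : List Char) : List Char → List Char → List Nat
  | s, [] => [edst a' s]
  | s, z :: rbs => edst a' s :: rowF a' (z :: s) rbs

theorem rowF_headD (a' s rb : List Char) : (rowF a' s rb).headD 0 = edst a' s := by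
  cases rb <;> rfl

theorem step_row (c1 : Char) (a' : List Char) :
    ∀ (rb s : List Char),
      List.scanl (gLev c1) (edst (c1 :: a') s) (rb.zip ((rowF a' s rb).zip (rowF a' s rb).tail))
        = rowF (c1 :: a') s rb := by
  intro rb
  induction rb with
  | nil => intro s; simp [rowF, List.scanl_nil]
  | cons z rbs ih =>
    intro s
    have hg : gLev c1 (edst (c1 :: a') s) (z, (edst a' s, edst a' (z :: s))) = edst (c1 :: a') (z :: s) := by
      rw [edst_step]
      simp [gLev]
    cases rbs with
    | nil =>
      simp only [rowF, List.tail_cons, List.zip_cons_cons, List.zip_nil_right]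
      rw [List.scanl_cons, List.scanl_nil]
      try rw [hg]
    | cons w r' =>
      simp only [rowF, List.tail_cons]
      rw [List.zip_cons_cons, List.zip_cons_cons, List.scanl_cons, hg]
      have ihz := ih (z :: s)
      simp only [rowF, List.tail_cons] at ihz
      rw [ihz]

theorem levStep_rowF (c : Char) (a' rb : List Char) :
    levStep c rb (rowF a' [] rb) = rowF (c :: a') [] rb := by
  rw [levStep_eq_scanl, rowF_headD, edst_nil_right]
  have : a'.length + 1 = edst (c :: a') [] := by simp [edst]
  rw [this]
  exact step_row c a' rb []

theorem fold_inv (rb : List Char) :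
    ∀ (l a' : List Char),
      l.foldl (fun r c => levStep c rb r) (rowF a' [] rb) = rowF (l.reverse ++ a') [] rb := by
  intro l
  induction l with
  | nil => intro a'; simp
  | cons c ls ih =>
    intro a'
    rw [List.foldl_cons, levStep_rowF, ih (c :: a')]
    simp

theorem rowF_init : ∀ (rb s : List Char), rowF [] s rb = List.range' s.length (rb.length + 1) := by
  intro rb
  induction rb with
  | nil => intro s; simp [rowF, edst, List.range']
  | cons z rbs ih =>
    intro s
    rw [show rowF [] s (z :: rbs) = edst [] s :: rowF [] (z :: s) rbs from rfl, ih (z :: s)]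
    simp [edst, List.range'_succ]

theorem rowF_last : ∀ (rb a' s : List Char), (rowF a' s rb).getD rb.length 0 = edst a' (rb.reverse ++ s) := by
  intro rb
  induction rb with
  | nil => intro a' s; simp [rowF]
  | cons z rbs ih =>
    intro a' s
    rw [show rowF a' s (z :: rbs) = edst a' s :: rowF a' (z :: s) rbs from rfl]
    simp only [List.length_cons, List.getD_cons_succ]
    rw [ih a' (z :: s)]
    simp

theorem alt_edist (s1 s2 : String) :
    levenshtein_alt s1 s2 = decide (edst s1.toList s2.toList ≤ 1) := by
  unfold levenshtein_alt
  set a := s1.toList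
  set b := s2.toList
  dsimp only
  have hinit : List.range (b.length + 1) = rowF [] [] b.reverse := by
    rw [rowF_init]
    simp [List.range_eq_range']
  rw [hinit, fold_inv b.reverse a.reverse []]
  have hlen : b.length = b.reverse.length := by simp
  rw [hlen, rowF_last]
  simp

-- ---- reference form of B (the old scan formulation), used to reuse the A-side proofs ----
def refAlt (s1 : String) (s2 : String) : Bool :=
  let a0 := s1.toList
  let b0 := s2.toList
  let a := if a0.length > b0.length then b0 else a0
  let b := if a0.length > b0.length then a0 else b0
  if b.length - a.length > 1 then false
  else if a.length = b.length then decide ((a.zip b).countP (fun p => decide (p.1 ≠ p.2)) ≤ 1)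
  else altScan a b

theorem edst_le_refAlt_core (a b : List Char) (hle : a.length ≤ b.length) :
    decide (edst a b ≤ 1) =
      (if b.length - a.length > 1 then false
       else if a.length = b.length then decide ((a.zip b).countP (fun p => decide (p.1 ≠ p.2)) ≤ 1)
       else altScan a b) := by
  by_cases hgap : b.length - a.length > 1
  · rw [if_pos hgap]
    have hlb := (edst_length a b).1
    simp only [decide_eq_false_iff_not, not_le]
    omega
  · rw [if_neg hgap]
    by_cases heq : a.length = b.length
    · rw [if_pos heq]
      exact decide_eq_decide.mpr (edst_eq_len a b heq)
    · rw [if_neg heq]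
      have h1 : b.length = a.length + 1 := by omega
      have hiff := edst_succ_len a b h1
      cases hs : altScan a b
      · simp only [decide_eq_false_iff_not, not_le]
        rw [hs] at hiff
        simp at hiff
        omega
      · rw [hs] at hiff
        simpa using hiff.mpr rfl

theorem alt_eq_ref (s1 s2 : String) : levenshtein_alt s1 s2 = refAlt s1 s2 := by
  rw [alt_edist]
  unfold refAlt
  set a0 := s1.toList
  set b0 := s2.toList
  dsimp only
  by_cases hsw : a0.length > b0.length
  · simp only [if_pos hsw]
    rw [edst_comm]
    exact edst_le_refAlt_core b0 a0 (by omega)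
  · simp only [if_neg hsw]
    exact edst_le_refAlt_core a0 b0 (by omega)

-- ---- A-side characterisation (A vs refAlt outside/inside D_) ----

-- proof-side restatement of the change region with total indexing
def DIdx (a : List Char) (b : List Char) : Prop :=
  ∃ i < a.length, a.take i = b.take i ∧ a.getD i ' ' ≠ b.getD i ' ' ∧
    a.getD i ' ' ≠ b.getD (i + 1) ' ' ∧ a.drop (i + 1) = b.drop (i + 2)

theorem dcore_didx (a b : List Char) :
    Dcore a b ↔ b.length = a.length + 1 ∧ DIdx a b := by
  unfold Dcore DIdx
  refine and_congr_right fun hl => ?_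
  refine exists_congr fun i => and_congr_right fun hi => and_congr_right fun htake => ?_
  have hb1 : i < b.length := by omega
  have hb2 : i + 1 < b.length := by omega
  have ha : a = a.take i ++ a[i] :: a.drop (i + 1) := by
    conv_lhs => rw [← List.take_append_drop i a, List.drop_eq_getElem_cons hi]
  have hb : b.eraseIdx i = a.take i ++ b[i + 1] :: b.drop (i + 2) := by
    rw [List.eraseIdx_eq_take_drop_succ, List.drop_eq_getElem_cons hb2, htake]
  have hkey : ∀ hdrop : a.drop (i + 1) = b.drop (i + 2), (a ≠ b.eraseIdx i ↔ ¬ a[i] = b[i + 1]) := by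
    intro hdrop
    constructor
    · intro herase hEq
      apply herase
      rw [hb, ← hdrop, ← hEq, ← ha]
    · intro hne hEq
      apply hne
      rw [hb, ← hdrop] at hEq
      have h3 := List.append_cancel_left (ha.symm.trans hEq)
      exact (List.cons_eq_cons.mp h3).1
  constructor
  · rintro ⟨hne, herase, hdrop⟩
    refine ⟨by simpa [List.getElem?_eq_getElem hi, List.getElem?_eq_getElem hb1] using hne, ?_, hdrop⟩
    simpa [List.getD_eq_getElem?_getD, List.getElem?_eq_getElem hi, List.getElem?_eq_getElem hb2]
      using (hkey hdrop).mp herase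
  · rintro ⟨hne, hne2, hdrop⟩
    refine ⟨by simpa [List.getElem?_eq_getElem hi, List.getElem?_eq_getElem hb1] using hne, ?_, hdrop⟩
    refine (hkey hdrop).mpr ?_
    simpa [List.getD_eq_getElem?_getD, List.getElem?_eq_getElem hi, List.getElem?_eq_getElem hb2]
      using hne2

theorem loopS_true (a c : List Char) (h : a.length = c.length) :
    levLoopS a c true = decide (a = c) := by
  induction a generalizing c with
  | nil => cases c with
    | nil => simp [levLoopS]
    | cons z zs => simp at h
  | cons x xs ih => cases c with
    | nil => simp at h
    | cons z zs =>
      simp only [levLoopS]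
      by_cases hxz : x = z
      · subst hxz; simp [ih zs (by simpa using h)]
      · simp [hxz]

theorem cnt_zip_self (a : List Char) :
    (a.zip a).countP (fun p => decide (p.1 ≠ p.2)) = 0 := by
  induction a with
  | nil => rfl
  | cons x xs ih => rw [List.zip_cons_cons, List.countP_cons, ih]; simp

theorem loopE_char (a b : List Char) (h : a.length = b.length) :
    (levLoopE a b false = decide ((a.zip b).countP (fun p => decide (p.1 ≠ p.2)) ≤ 1)) ∧
    (levLoopE a b true = decide ((a.zip b).countP (fun p => decide (p.1 ≠ p.2)) = 0)) := by
  induction a generalizing b with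
  | nil => cases b with
    | nil => simp [levLoopE]
    | cons z zs => simp at h
  | cons x xs ih => cases b with
    | nil => simp at h
    | cons z zs =>
      obtain ⟨ih0, ih1⟩ := ih zs (by simpa using h)
      by_cases hxz : x = z
      · subst hxz; simp [levLoopE, ih0, ih1]
      · constructor
        · simp only [levLoopE, List.zip_cons_cons]
          simp [hxz, ih1]
        · simp [levLoopE, List.zip_cons_cons, hxz]

theorem loopL_flip (b a : List Char) (flag : Bool) :
    levLoopL a b flag = levLoopS b a flag := by
  induction b generalizing a flag with
  | nil => cases a <;> cases flag <;> simp [levLoopL, levLoopS]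
  | cons y ys ih => cases a with
    | nil => cases flag <;> simp [levLoopL, levLoopS]
    | cons x xs =>
      cases flag with
      | false =>
        simp only [levLoopL, levLoopS]
        by_cases hxy : x = y
        · subst hxy; simp [ih]
        · simp [hxy, Ne.symm hxy, ih]
      | true =>
        simp only [levLoopL, levLoopS]
        by_cases hxy : x = y
        · subst hxy; simp [ih]
        · simp [hxy, Ne.symm hxy]

theorem didx_cons (x y : Char) (xs ys : List Char) :
    DIdx (x :: xs) (y :: ys) ↔
      (x ≠ y ∧ x ≠ ys.getD 0 ' ' ∧ xs = ys.drop 1) ∨ (x = y ∧ DIdx xs ys) := by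
  constructor
  · rintro ⟨i, hi, htake, hne, hne2, hdrop⟩
    cases i with
    | zero =>
      left
      exact ⟨by simpa using hne, by simpa using hne2, by simpa using hdrop⟩
    | succ j =>
      right
      simp only [List.take_succ_cons, List.cons.injEq] at htake
      refine ⟨htake.1, j, by simpa using hi, htake.2, by simpa using hne,
        by simpa using hne2, by simpa using hdrop⟩
  · rintro (⟨h1, h2, h3⟩ | ⟨hxy, j, hj, htake, hne, hne2, hdrop⟩)
    · exact ⟨0, by simp, by simp, by simpa using h1, by simpa using h2, by simpa using h3⟩
    · exact ⟨j + 1, by simpa using hj, by simp [htake, hxy], by simpa using hne,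
        by simpa using hne2, by simpa using hdrop⟩

theorem loopS_scan (a b : List Char) (h : b.length = a.length + 1) (hd : ¬ DIdx a b) :
    levLoopS a b false = altScan a b := by
  induction a generalizing b with
  | nil =>
    cases b with
    | nil => simp at h
    | cons z zs =>
      simp at h
      simp [levLoopS, altScan, h]
  | cons x xs ih =>
    cases b with
    | nil => simp at h
    | cons y ys =>
      rw [didx_cons] at hd
      push Not at hd
      have hlen : ys.length = xs.length + 1 := by simpa using h
      by_cases hxy : x = y
      · subst hxy
        have e1 : levLoopS (x :: xs) (x :: ys) false = levLoopS xs ys false := by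
          simp [levLoopS]
        have e2 : altScan (x :: xs) (x :: ys) = altScan xs ys := by simp [altScan]
        rw [e1, e2]
        exact ih ys hlen (hd.2 rfl)
      · cases ys with
        | nil => simp at hlen
        | cons z zs =>
          simp only [levLoopS, altScan, if_pos hxy, if_neg hxy, List.drop_one, List.tail_cons]
          rw [loopS_true xs zs (by simp only [List.length_cons] at hlen; omega)]
          by_cases hxz : x = z
          · subst hxz; simp
          · have hxs : xs ≠ zs := by
              have := (hd.1 hxy) (by simpa using hxz)
              simpa using this
            simp [hxz, hxs]

theorem loopS_scan_D (a b : List Char) (h : b.length = a.length + 1) (hd : DIdx a b) :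
    levLoopS a b false = true ∧ altScan a b = false := by
  induction a generalizing b with
  | nil =>
    obtain ⟨i, hi, _⟩ := hd
    simp at hi
  | cons x xs ih =>
    cases b with
    | nil => simp at h
    | cons y ys =>
      rw [didx_cons] at hd
      have hlen : ys.length = xs.length + 1 := by simpa using h
      rcases hd with ⟨h1, h2, h3⟩ | ⟨hxy, hD⟩
      · cases ys with
        | nil => simp at hlen
        | cons z zs =>
          simp only [levLoopS, altScan, if_pos h1, if_neg h1, List.drop_one, List.tail_cons]
          have h3' : xs = zs := by simpa using h3
          have hxz : x ≠ z := by simpa using h2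
          constructor
          · rw [loopS_true xs zs (by rw [h3'])]; simp [h3']
          · simp [hxz]
      · subst hxy
        have e1 : levLoopS (x :: xs) (x :: ys) false = levLoopS xs ys false := by
          simp [levLoopS]
        have e2 : altScan (x :: xs) (x :: ys) = altScan xs ys := by simp [altScan]
        rw [e1, e2]
        exact ih ys hlen hD

theorem main_eq (s1 s2 : String) (hd : ¬ D_levenshtein s1 s2) :
    levenshtein s1 s2 = refAlt s1 s2 := by
  unfold levenshtein refAlt
  unfold D_levenshtein at hd
  set l1 := s1.toList with hl1
  set l2 := s2.toList with hl2
  dsimp only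
  by_cases hbig : ((l1.length : Int) - (l2.length : Int)).natAbs > 1
  · by_cases hsw : l1.length > l2.length
    · simp only [if_pos hbig, if_pos hsw, if_pos (show l1.length - l2.length > 1 by omega)]
    · simp only [if_pos hbig, if_neg hsw, if_pos (show l2.length - l1.length > 1 by omega)]
  · by_cases heq : l1.length = l2.length
    · by_cases hs : l1 = l2
      · simp only [if_neg hbig, if_neg (show ¬ l1.length > l2.length by omega),
          if_neg (show ¬ l2.length - l1.length > 1 by omega), if_pos hs, if_pos heq]
        rw [hs, cnt_zip_self]
        simp
      · simp only [if_neg hbig, if_neg (show ¬ l1.length > l2.length by omega),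
          if_neg (show ¬ l2.length - l1.length > 1 by omega), if_neg hs, if_pos heq]
        exact (loopE_char l1 l2 heq).1
    · by_cases hlt : l1.length < l2.length
      · have h1 : l2.length = l1.length + 1 := by omega
        have hs : l1 ≠ l2 := fun hh => heq (by rw [hh])
        simp only [if_neg hbig, if_neg hs, if_neg (show ¬ l1.length > l2.length by omega),
          if_neg (show ¬ l2.length - l1.length > 1 by omega), if_neg heq, if_pos hlt]
        exact loopS_scan l1 l2 h1 (fun hc => hd (Or.inl ((dcore_didx l1 l2).mpr ⟨h1, hc⟩)))
      · have h1 : l1.length = l2.length + 1 := by omega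
        have hs : l1 ≠ l2 := fun hh => heq (by rw [hh])
        simp only [if_neg hbig, if_neg hs, if_pos (show l1.length > l2.length by omega),
          if_neg (show ¬ l1.length - l2.length > 1 by omega), if_neg heq,
          if_neg (show ¬ l1.length < l2.length by omega),
          if_neg (show ¬ l2.length = l1.length by omega)]
        rw [loopL_flip]
        exact loopS_scan l2 l1 h1 (fun hc => hd (Or.inr ((dcore_didx l2 l1).mpr ⟨h1, hc⟩)))

theorem main_ne (s1 s2 : String) (hd : D_levenshtein s1 s2) :
    levenshtein s1 s2 ≠ refAlt s1 s2 := by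
  unfold levenshtein refAlt
  unfold D_levenshtein at hd
  set l1 := s1.toList with hl1
  set l2 := s2.toList with hl2
  dsimp only
  rcases hd with hD | hD
  · obtain ⟨hlen, hc⟩ := (dcore_didx l1 l2).mp hD
    obtain ⟨hA, hB⟩ := loopS_scan_D l1 l2 hlen hc
    have hs : l1 ≠ l2 := fun hh => by rw [hh] at hlen; omega
    simp only [if_neg (show ¬ ((l1.length : Int) - (l2.length : Int)).natAbs > 1 by omega),
      if_neg hs, if_neg (show ¬ l1.length > l2.length by omega),
      if_neg (show ¬ l2.length - l1.length > 1 by omega),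
      if_neg (show ¬ l1.length = l2.length by omega),
      if_pos (show l1.length < l2.length by omega)]
    rw [hA, hB]
    simp
  · obtain ⟨hlen, hc⟩ := (dcore_didx l2 l1).mp hD
    obtain ⟨hA, hB⟩ := loopS_scan_D l2 l1 hlen hc
    have hs : l1 ≠ l2 := fun hh => by rw [hh] at hlen; omega
    simp only [if_neg (show ¬ ((l1.length : Int) - (l2.length : Int)).natAbs > 1 by omega),
      if_neg hs, if_pos (show l1.length > l2.length by omega),
      if_neg (show ¬ l1.length - l2.length > 1 by omega),
      if_neg (show ¬ l1.length = l2.length by omega),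
      if_neg (show ¬ l1.length < l2.length by omega),
      if_neg (show ¬ l2.length = l1.length by omega)]
    rw [loopL_flip, hA, hB]
    simp

-- ===== VERDICT (by name: the statement is the Claim_ definition above) =====
theorem levenshtein_spec : Claim_unchanged_levenshtein := by
  intro s1 s2 _ hd
  rw [alt_eq_ref]
  exact main_eq s1 s2 hd

theorem levenshtein_changed : Claim_changed_levenshtein := by
  unfold Claim_changed_levenshtein; decide

theorem levenshtein_tight : Claim_exact_levenshtein := by
  intro s1 s2 _ hd
  rw [alt_eq_ref]
  exact main_ne s1 s2 hd
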